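-- pv_equiv track=rewrite | github.com/Nauqcaj/itp-w1-create-box | create_box/main.py | create_empty_box
-- ===== SOURCE A (Python) =====
-- def create_empty_box(height, width, character):
--     if height >= 1 and width >=1:
--         box = ""
--
--         for i in range(height):
--             empty_string = ''
--             for j in range(width):
--                 if i == 0 or i  == (height - 1) or j == 0 or j == (width -1):
--                     empty_string += character
--                 else:
--                   empty_string += ' '
--             box += (empty_string)
--             box += "\n"
--
--
--     else:
--         return "Oops! Need higher values for height and/or width."
--
--     return box
-- ===== SOURCE B (Python) =====
-- def create_empty_box(height, width, character):
--     if height >= 1 and width >= 1: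
--         top = character * width
--         if width == 1:
--             mid = character
--         else:
--             mid = character + ' ' * (width - 2) + character
--         rows = [top if i == 0 or i == height - 1 else mid for i in range(height)]
--         return '\n'.join(rows) + '\n'
--     else:
--         return "Oops! Need higher values for height and/or width."
-- ===== Notes on version B (the rewrite author's own statement) =====
-- stated objective: simpler
-- what changed: Replaces the per-cell nested loops of character-by-character string concatenation with whole-row construction (string multiplication for top/bottom and a spaces-filled interior row, width==1 special-cased) joined once with '\n'.join.
import Mathlib
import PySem

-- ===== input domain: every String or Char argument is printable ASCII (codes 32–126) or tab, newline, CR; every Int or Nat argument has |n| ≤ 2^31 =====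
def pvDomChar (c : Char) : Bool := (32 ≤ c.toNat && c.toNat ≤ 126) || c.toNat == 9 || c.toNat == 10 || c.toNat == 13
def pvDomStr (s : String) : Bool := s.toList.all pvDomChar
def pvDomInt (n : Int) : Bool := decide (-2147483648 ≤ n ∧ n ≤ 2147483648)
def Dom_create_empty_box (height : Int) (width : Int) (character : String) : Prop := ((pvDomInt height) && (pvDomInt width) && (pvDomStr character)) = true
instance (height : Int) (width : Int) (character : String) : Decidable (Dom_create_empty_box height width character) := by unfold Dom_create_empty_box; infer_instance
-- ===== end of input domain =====

-- B builds each row at once (character*width border rows, spaces-filled interior rows) and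
-- joins them with '\n', instead of A's per-cell nested concatenation loops; objective: simpler.

-- ===== PORT A =====
def create_empty_box (height : Int) (width : Int) (character : String) : String :=
  if 1 ≤ height ∧ 1 ≤ width then
    (PySem.List.pyRange 0 height 1).foldl (fun box i =>
      let empty_string := (PySem.List.pyRange 0 width 1).foldl (fun es j =>
        if i = 0 ∨ i = height - 1 ∨ j = 0 ∨ j = width - 1 then es ++ character
        else es ++ " ") ""
      box ++ empty_string ++ "\n") ""
  else "Oops! Need higher values for height and/or width."

-- ===== PORT B =====
-- exact port of Python's `s * n` for int n (n ≤ 0 gives "")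
def pyStrMul (s : String) (n : Int) : String :=
  String.ofList ((List.replicate n.toNat s.toList).flatten)

def create_empty_box_alt (height : Int) (width : Int) (character : String) : String :=
  if 1 ≤ height ∧ 1 ≤ width then
    let top := pyStrMul character width
    let mid := if width = 1 then character
               else character ++ pyStrMul " " (width - 2) ++ character
    let rows := (PySem.List.pyRange 0 height 1).map
      (fun i => if i = 0 ∨ i = height - 1 then top else mid)
    PySem.Str.join "\n" rows ++ "\n"
  else "Oops! Need higher values for height and/or width."

-- ===== PRECONDITION & SPEC =====
def Spec_create_empty_box (height : Int) (width : Int) (character : String) (out : String) : Prop := out = create_empty_box_alt height width character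
instance (height : Int) (width : Int) (character : String) (out : String) : Decidable (Spec_create_empty_box height width character out) := by unfold Spec_create_empty_box; infer_instance

-- ===== CLAIM (what is proved, stated in full; the proofs are below) =====
def Claim_equal_create_empty_box : Prop := ∀ (height : Int) (width : Int) (character : String), Dom_create_empty_box height width character → Spec_create_empty_box height width character (create_empty_box height width character)

-- ===== LEMMAS AND PROOFS =====

theorem pv_flatMap_congr_mem {α β : Type} {l : List α} {f g : α → List β}
    (h : ∀ x ∈ l, f x = g x) : l.flatMap f = l.flatMap g := by
  induction l with
  | nil => rfl
  | cons a t ih =>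
      simp only [List.flatMap_cons]
      rw [h a (by simp), ih (fun x hx => h x (by simp [hx]))]

theorem pv_flatMap_const {α : Type} (cs : List Char) (l : List α) :
    l.flatMap (fun _ => cs) = (List.replicate l.length cs).flatten := by
  induction l with
  | nil => rfl
  | cons a t ih => simp [List.flatMap_cons, ih, List.replicate_succ]

theorem pv_join_nl (nl r : List Char) (rs : List (List Char)) :
    PySem.Chars.join nl (r :: rs) ++ nl = (r :: rs).flatMap (fun x => x ++ nl) := by
  induction rs generalizing r with
  | nil => simp [PySem.Chars.join_singleton]
  | cons q rest ih =>
      rw [PySem.Chars.join_cons_cons]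
      simp only [List.append_assoc]
      rw [ih q]
      simp [List.append_assoc]

-- A's inner loop, moved to the List Char level, is a flatMap of cells
theorem pv_inner_eq (height width i : Int) (character : String) :
    String.toList ((PySem.List.pyRange 0 width 1).foldl (fun es j =>
        if i = 0 ∨ i = height - 1 ∨ j = 0 ∨ j = width - 1 then es ++ character
        else es ++ " ") "") =
    (PySem.List.pyRange 0 width 1).flatMap (fun j =>
        if i = 0 ∨ i = height - 1 ∨ j = 0 ∨ j = width - 1 then character.toList
        else [' ']) := by
  rw [← List.foldl_hom String.toList
      (g₂ := fun (acc : List Char) j =>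
        acc ++ (if i = 0 ∨ i = height - 1 ∨ j = 0 ∨ j = width - 1 then character.toList else [' ']))
      (fun es j => by by_cases hc : i = 0 ∨ i = height - 1 ∨ j = 0 ∨ j = width - 1 <;> simp [hc])]
  simpa using PySem.List.foldl_append_eq_flatMap
    (fun j => if i = 0 ∨ i = height - 1 ∨ j = 0 ∨ j = width - 1 then character.toList else [' '])
    (PySem.List.pyRange 0 width 1) []

-- one row of A equals one row of B, for 0 ≤ i < height (width ≥ 1)
theorem pv_row_eq (height width i : Int) (character : String) (hw : 1 ≤ width) :
    (PySem.List.pyRange 0 width 1).flatMap (fun j =>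
        if i = 0 ∨ i = height - 1 ∨ j = 0 ∨ j = width - 1 then character.toList
        else [' ']) =
    String.toList (if i = 0 ∨ i = height - 1 then pyStrMul character width
                   else if width = 1 then character
                        else character ++ pyStrMul " " (width - 2) ++ character) := by
  by_cases hb : i = 0 ∨ i = height - 1
  · rw [if_pos hb,
        pv_flatMap_congr_mem (g := fun _ => character.toList)
          (fun j _ => by simp [hb.elim (fun h => Or.inl h) (fun h => Or.inr (Or.inl h))]),
        pv_flatMap_const, PySem.List.length_pyRange_one]
    simp [pyStrMul, String.toList_ofList]
  · rw [if_neg hb]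
    push Not at hb
    obtain ⟨h1, h2⟩ := hb
    by_cases hw1 : width = 1
    · subst hw1
      rw [if_pos rfl, show PySem.List.pyRange 0 1 1 = [0] from by
            simpa using PySem.List.pyRange_one_singleton (a := (0 : Int))]
      simp [h1, h2]
    · rw [if_neg hw1]
      have hw2 : 2 ≤ width := by omega
      rw [PySem.List.pyRange_one_append 0 1 width (by omega) (by omega),
          PySem.List.pyRange_one_append 1 (width - 1) width (by omega) (by omega),
          show PySem.List.pyRange 0 1 1 = [0] from by
            simpa using PySem.List.pyRange_one_singleton (a := (0 : Int)),
          show PySem.List.pyRange (width - 1) width 1 = [width - 1] from by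
            have h3 := PySem.List.pyRange_one_singleton (a := width - 1)
            rwa [show width - 1 + 1 = width from by omega] at h3]
      rw [List.flatMap_append, List.flatMap_append,
          pv_flatMap_congr_mem (l := PySem.List.pyRange 1 (width - 1) 1)
            (g := fun _ => ([' '] : List Char))
            (fun j hj => by
              rw [PySem.List.mem_pyRange_one] at hj
              simp only [h1, h2, false_or]
              rw [if_neg (by omega)]),
          pv_flatMap_const, PySem.List.length_pyRange_one]
      simp [h1, h2, pyStrMul, String.toList_ofList, String.toList_append, show width - 1 - 1 = width - 2 from by omega]

theorem pv_join_nl' (nl : List Char) (l : List (List Char)) (h : l ≠ []) :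
    PySem.Chars.join nl l ++ nl = l.flatMap (fun x => x ++ nl) := by
  obtain ⟨r, rs, rfl⟩ := List.exists_cons_of_ne_nil h
  exact pv_join_nl nl r rs

-- ===== VERDICT (by name: the statement is the Claim_ definition above) =====
theorem create_empty_box_spec : Claim_equal_create_empty_box := by
  intro height width character _
  unfold Spec_create_empty_box create_empty_box create_empty_box_alt
  by_cases hg : 1 ≤ height ∧ 1 ≤ width
  · rw [if_pos hg, if_pos hg]
    obtain ⟨hh, hw⟩ := hg
    apply String.ext
    -- left side: move the outer fold to List Char, then to a flatMap of rows
    rw [← List.foldl_hom String.toList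
        (g₂ := fun (acc : List Char) i =>
          acc ++ (String.toList ((PySem.List.pyRange 0 width 1).foldl (fun es j =>
            if i = 0 ∨ i = height - 1 ∨ j = 0 ∨ j = width - 1 then es ++ character
            else es ++ " ") "") ++ ['\n']))
        (fun box i => by simp [String.toList_append])]
    have hinit : String.toList "" = ([] : List Char) := rfl
    rw [hinit, PySem.List.foldl_append_eq_flatMap, List.nil_append]
    -- right side: join + trailing newline is a flatMap of rows
    rw [String.toList_append, PySem.Str.toList_join, List.map_map,
        show ("\n" : String).toList = ['\n'] from rfl,
        pv_join_nl' ['\n'] _ (by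
          intro h0
          have hlen := congrArg List.length h0
          simp only [List.length_map, PySem.List.length_pyRange_one, List.length_nil] at hlen
          omega),
        List.flatMap_map]
    -- rows agree pointwise on the range
    refine pv_flatMap_congr_mem (fun i _ => ?_)
    rw [pv_inner_eq, pv_row_eq height width i character hw]
    rfl
  · rw [if_neg hg, if_neg hg]
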